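-- pv_equiv track=rewrite | github.com/risanlang/Part_of_Speech-POS- | Hidden_Markov_Model.py | calc_ngram_counts
-- ===== SOURCE A (Python) =====
-- from collections import defaultdict, deque
--
-- def calc_ngrams(sent_tags, n):
--     ngrams = [tuple(sent_tags[i:(i + n)]) for i in range(len(sent_tags) - n + 1)]
--     return ngrams
--
-- def calc_ngram_counts(brown_tags):
--     unigram_c = defaultdict(int)
--     bigram_c = defaultdict(int)
--     trigram_c = defaultdict(int)
--
--     for sent_tags in brown_tags:
--         unigram_tags = calc_ngrams(sent_tags, 1)
--         bigram_tags = calc_ngrams(sent_tags, 2)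
--         trigram_tags = calc_ngrams(sent_tags, 3)
--
--         for unigram in unigram_tags:
--             unigram_c[unigram] += 1
--
--         for bigram in bigram_tags:
--             bigram_c[bigram] += 1
--
--         for trigram in trigram_tags:
--             trigram_c[trigram] += 1
--
--     return unigram_c, bigram_c, trigram_c
-- ===== SOURCE B (Python) =====
-- from collections import defaultdict
--
-- def calc_ngram_counts(brown_tags):
--     unigram_c = defaultdict(int)
--     bigram_c = defaultdict(int)
--     trigram_c = defaultdict(int)
--
--     for sent_tags in brown_tags:
--         p1 = p2 = None
--         for tag in sent_tags:
--             unigram_c[(tag,)] += 1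
--             if p1 is not None:
--                 bigram_c[(p1, tag)] += 1
--             if p2 is not None:
--                 trigram_c[(p2, p1, tag)] += 1
--             p2, p1 = p1, tag
--
--     return unigram_c, bigram_c, trigram_c
-- ===== Notes on version B (the rewrite author's own statement) =====
-- stated objective: simpler
-- what changed: Dropped the calc_ngrams slicing helper and its three per-sentence comprehension passes; B makes one pass over each sentence keeping the last two tags (p1, p2) as a sliding window and increments the three counters in that single loop.
import Mathlib
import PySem

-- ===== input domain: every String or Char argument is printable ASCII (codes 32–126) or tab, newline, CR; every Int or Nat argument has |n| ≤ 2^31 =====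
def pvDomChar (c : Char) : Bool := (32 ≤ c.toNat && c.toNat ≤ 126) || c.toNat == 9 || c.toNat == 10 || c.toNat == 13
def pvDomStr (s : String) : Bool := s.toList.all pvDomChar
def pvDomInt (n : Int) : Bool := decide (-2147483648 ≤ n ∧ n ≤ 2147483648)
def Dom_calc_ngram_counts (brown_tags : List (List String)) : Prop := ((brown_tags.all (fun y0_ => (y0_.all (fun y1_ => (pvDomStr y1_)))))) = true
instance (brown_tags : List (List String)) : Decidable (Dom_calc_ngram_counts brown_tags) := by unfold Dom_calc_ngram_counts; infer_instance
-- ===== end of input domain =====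

-- B replaces the calc_ngrams slicing helper by a single pass per sentence that keeps the
-- last two tags as a sliding window (objective: simpler — one loop, no slice lists).

-- d[k] += 1 on a defaultdict(int)
def dinc (d : PySem.Dict (List String) Int) (k : List String) : PySem.Dict (List String) Int :=
  d.modify k 0 (· + 1)

-- ===== PORT A =====
def calc_ngrams (sent_tags : List String) (n : Int) : List (List String) :=
  (PySem.List.pyRange 0 ((sent_tags.length : Int) - n + 1) 1).map
    (fun i => PySem.List.slice sent_tags (some i) (some (i + n)))

-- body of A's 'for sent_tags in brown_tags' loop
def aSentStep
    (st : PySem.Dict (List String) Int × PySem.Dict (List String) Int × PySem.Dict (List String) Int)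
    (sent_tags : List String) :
    PySem.Dict (List String) Int × PySem.Dict (List String) Int × PySem.Dict (List String) Int :=
  let unigram_tags := calc_ngrams sent_tags 1
  let bigram_tags := calc_ngrams sent_tags 2
  let trigram_tags := calc_ngrams sent_tags 3
  (unigram_tags.foldl dinc st.1, bigram_tags.foldl dinc st.2.1, trigram_tags.foldl dinc st.2.2)

def calc_ngram_counts (brown_tags : List (List String)) :
    (List (List String × Int)) × (List (List String × Int)) × (List (List String × Int)) :=
  let r := brown_tags.foldl aSentStep (PySem.Dict.empty, PySem.Dict.empty, PySem.Dict.empty)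
  (r.1.items, r.2.1.items, r.2.2.items)

-- ===== PORT B =====
-- body of B's 'for tag in sent_tags' loop; state = (unigram_c, bigram_c, trigram_c, p1, p2)
def bTagStep
    (s : PySem.Dict (List String) Int × PySem.Dict (List String) Int × PySem.Dict (List String) Int × Option String × Option String)
    (tag : String) :
    PySem.Dict (List String) Int × PySem.Dict (List String) Int × PySem.Dict (List String) Int × Option String × Option String :=
  let u := dinc s.1 [tag]
  let b := match s.2.2.2.1 with
    | some p1 => dinc s.2.1 [p1, tag]
    | none => s.2.1
  let t := match s.2.2.2.2, s.2.2.2.1 with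
    | some p2, some p1 => dinc s.2.2.1 [p2, p1, tag]
    | _, _ => s.2.2.1
  (u, b, t, some tag, s.2.2.2.1)

-- body of B's 'for sent_tags in brown_tags' loop: p1 = p2 = None, then the tag loop
def bSentStep
    (st : PySem.Dict (List String) Int × PySem.Dict (List String) Int × PySem.Dict (List String) Int)
    (sent_tags : List String) :
    PySem.Dict (List String) Int × PySem.Dict (List String) Int × PySem.Dict (List String) Int :=
  let r := sent_tags.foldl bTagStep (st.1, st.2.1, st.2.2, none, none)
  (r.1, r.2.1, r.2.2.1)

def calc_ngram_counts_alt (brown_tags : List (List String)) :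
    (List (List String × Int)) × (List (List String × Int)) × (List (List String × Int)) :=
  let r := brown_tags.foldl bSentStep (PySem.Dict.empty, PySem.Dict.empty, PySem.Dict.empty)
  (r.1.items, r.2.1.items, r.2.2.items)

-- ===== PRECONDITION & SPEC =====
def Spec_calc_ngram_counts (brown_tags : List (List String)) (out : (List (List String × Int)) × (List (List String × Int)) × (List (List String × Int))) : Prop := out = calc_ngram_counts_alt brown_tags
instance (brown_tags : List (List String)) (out : (List (List String × Int)) × (List (List String × Int)) × (List (List String × Int))) : Decidable (Spec_calc_ngram_counts brown_tags out) := by unfold Spec_calc_ngram_counts; infer_instance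

-- ===== CLAIM (what is proved, stated in full; the proofs are below) =====
def Claim_equal_calc_ngram_counts : Prop := ∀ (brown_tags : List (List String)), Dom_calc_ngram_counts brown_tags → Spec_calc_ngram_counts brown_tags (calc_ngram_counts brown_tags)

-- ===== LEMMAS AND PROOFS =====

-- the list of m-grams of l, structurally
def g (m : Nat) (l : List String) : List (List String) :=
  (List.range (l.length + 1 - m)).map (fun i => (l.drop i).take m)

lemma g_cons (m : Nat) (a : String) (l : List String) :
    g m (a :: l) = if m ≤ l.length + 1 then ((a :: l).take m) :: g m l else [] := by
  unfold g
  split_ifs with h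
  · have hlen : (a :: l).length + 1 - m = (l.length + 1 - m) + 1 := by
      simp only [List.length_cons]; omega
    rw [hlen, List.range_succ_eq_map, List.map_cons, List.map_map]
    simp [Function.comp]
  · have hlen : (a :: l).length + 1 - m = 0 := by
      simp only [List.length_cons]; omega
    simp only [hlen, List.range_zero, List.map_nil]

lemma calc_ngrams_eq (l : List String) (m : Nat) : calc_ngrams l (m : Int) = g m l := by
  unfold calc_ngrams g
  rw [PySem.List.pyRange_one, List.map_map]
  have hn : (((l.length : Int) - (m : Int) + 1) - 0).toNat = l.length + 1 - m := by omega
  rw [hn]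
  apply List.map_congr_left
  intro k _
  simp only [Function.comp, zero_add]
  exact PySem.List.slice_natCast_add l k m

lemma uni_eq (l : List String) : l.map (fun a => ([a] : List String)) = g 1 l := by
  induction l with
  | nil => simp [g]
  | cons a l ih => rw [List.map_cons, ih, g_cons]; simp

def pairsFrom : Option String → List String → List (List String)
  | _, [] => []
  | none, a :: l => pairsFrom (some a) l
  | some x, a :: l => [x, a] :: pairsFrom (some a) l

def triFrom : Option String → Option String → List String → List (List String)
  | _, _, [] => []
  | some y, some x, a :: l => [y, x, a] :: triFrom (some x) (some a) l
  | none, p1, a :: l => triFrom p1 (some a) l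
  | some _, none, a :: l => triFrom none (some a) l

lemma pairsFrom_some (l : List String) : ∀ x, pairsFrom (some x) l = g 2 (x :: l) := by
  induction l with
  | nil => intro x; simp [pairsFrom, g]
  | cons a l ih =>
      intro x
      rw [pairsFrom, ih, g_cons 2 x (a :: l), if_pos (by simp)]
      simp

lemma pairsFrom_none (l : List String) : pairsFrom none l = g 2 l := by
  cases l with
  | nil => simp [pairsFrom, g]
  | cons a l => rw [pairsFrom, pairsFrom_some]

lemma triFrom_ss (l : List String) : ∀ y x, triFrom (some y) (some x) l = g 3 (y :: x :: l) := by
  induction l with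
  | nil => intro y x; simp [triFrom, g]
  | cons a l ih =>
      intro y x
      rw [triFrom, ih, g_cons 3 y (x :: a :: l), if_pos (by simp)]
      simp

lemma triFrom_ns (l : List String) (x : String) : triFrom none (some x) l = g 3 (x :: l) := by
  cases l with
  | nil => simp [triFrom, g]
  | cons a l => rw [triFrom, triFrom_ss]

lemma triFrom_nn (l : List String) : triFrom none none l = g 3 l := by
  cases l with
  | nil => simp [triFrom, g]
  | cons a l => rw [triFrom, triFrom_ns]

lemma bfold_fst (l : List String) :
    ∀ u b t p1 p2, (l.foldl bTagStep (u, b, t, p1, p2)).1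
      = (l.map (fun a => ([a] : List String))).foldl dinc u := by
  induction l with
  | nil => intro u b t p1 p2; rfl
  | cons a l ih =>
      intro u b t p1 p2
      rw [List.foldl_cons, List.map_cons, List.foldl_cons]
      exact ih _ _ _ _ _

lemma bfold_snd (l : List String) :
    ∀ u b t p1 p2, (l.foldl bTagStep (u, b, t, p1, p2)).2.1
      = (pairsFrom p1 l).foldl dinc b := by
  induction l with
  | nil => intro u b t p1 p2; rfl
  | cons a l ih =>
      intro u b t p1 p2
      rw [List.foldl_cons]
      cases p1 with
      | none => rw [pairsFrom]; exact ih _ _ _ _ _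
      | some x => rw [pairsFrom, List.foldl_cons]; exact ih _ _ _ _ _

lemma bfold_trd (l : List String) :
    ∀ u b t p1 p2, (l.foldl bTagStep (u, b, t, p1, p2)).2.2.1
      = (triFrom p2 p1 l).foldl dinc t := by
  induction l with
  | nil => intro u b t p1 p2; rfl
  | cons a l ih =>
      intro u b t p1 p2
      cases p1 <;> cases p2 <;>
        simp only [List.foldl_cons, bTagStep, triFrom] <;>
        exact ih _ _ _ _ _

lemma sentStep_eq (st : PySem.Dict (List String) Int × PySem.Dict (List String) Int × PySem.Dict (List String) Int)
    (sent : List String) : bSentStep st sent = aSentStep st sent := by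
  obtain ⟨u, b, t⟩ := st
  unfold bSentStep aSentStep
  have h1 : ((1 : Int)) = ((1 : Nat) : Int) := by norm_num
  have h2 : ((2 : Int)) = ((2 : Nat) : Int) := by norm_num
  have h3 : ((3 : Int)) = ((3 : Nat) : Int) := by norm_num
  simp only [h1, h2, h3, calc_ngrams_eq]
  refine Prod.ext ?_ (Prod.ext ?_ ?_)
  · simpa [uni_eq] using bfold_fst sent u b t none none
  · simpa [pairsFrom_none] using bfold_snd sent u b t none none
  · simpa [triFrom_nn] using bfold_trd sent u b t none none

lemma fold_eq (bt : List (List String)) :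
    ∀ st, bt.foldl bSentStep st = bt.foldl aSentStep st := by
  induction bt with
  | nil => intro st; rfl
  | cons s bt ih =>
      intro st
      rw [List.foldl_cons, List.foldl_cons, sentStep_eq, ih]

-- ===== VERDICT (by name: the statement is the Claim_ definition above) =====
theorem calc_ngram_counts_spec : Claim_equal_calc_ngram_counts := by
  intro brown_tags _
  unfold Spec_calc_ngram_counts calc_ngram_counts calc_ngram_counts_alt
  rw [fold_eq]
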